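-- pv_equiv track=rewrite | github.com/Aviralgupt/JobPal-SaaS-v1 | server/services/resume_parser.py | _find_section_end
-- ===== SOURCE A (Python) =====
-- def _find_section_end(text: str, start_pos: int) -> int:
--     """Find the end of a section"""
--     # Look for next major section
--     next_sections = ['education', 'skills', 'projects', 'certifications', 'awards']
--     text_lower = text.lower()
--
--     min_end = len(text)
--     for section in next_sections:
--         pos = text_lower.find(section, start_pos + 10)
--         if pos != -1 and pos < min_end:
--             min_end = pos
--
--     return min_end
-- ===== SOURCE B (Python) =====
-- def _find_section_end(text: str, start_pos: int) -> int:
--     """Find the end of a section"""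
--     # Single left-to-right scan: return the first position at or after the
--     # search offset where any next-section keyword begins; len(text) if none.
--     keywords = ('education', 'skills', 'projects', 'certifications', 'awards')
--     tl = text.lower()
--     for i in range(max(start_pos + 10, 0), len(text)):
--         if any(tl.startswith(k, i) for k in keywords):
--             return i
--     return len(text)
-- ===== Notes on version B (the rewrite author's own statement) =====
-- stated objective: alternative
-- what changed: Replaces A's five independent str.find scans combined with a running minimum by a single left-to-right scan that returns the first position at or after max(start_pos+10, 0) where any of the five keywords begins (len(text) if none).
-- intended difference: When start_pos+10 is negative but start_pos+10+len(text) is not, A inherits str.find's count-from-the-end reading of the negative start and skips the beginning of the text, so on texts with a keyword before that wrapped position A returns a later position (or len(text)) while B returns the first keyword position from the start of the text, which is the intended 'nearest next section' for an offset before the text. — e.g. on _find_section_end("skills", -11): A returns 6, B returns 0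
import Mathlib
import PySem

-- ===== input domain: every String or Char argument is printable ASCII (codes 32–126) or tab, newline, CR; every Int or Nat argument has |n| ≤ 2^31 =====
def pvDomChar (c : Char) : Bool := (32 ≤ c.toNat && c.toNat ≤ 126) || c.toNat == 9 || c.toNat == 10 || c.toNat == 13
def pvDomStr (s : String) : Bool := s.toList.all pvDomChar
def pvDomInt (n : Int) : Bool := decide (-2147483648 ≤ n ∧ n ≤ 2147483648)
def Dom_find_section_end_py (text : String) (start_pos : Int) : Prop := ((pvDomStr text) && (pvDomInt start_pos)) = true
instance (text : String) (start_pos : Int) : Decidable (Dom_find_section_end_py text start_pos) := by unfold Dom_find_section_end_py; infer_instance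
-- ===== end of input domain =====

-- B replaces A's five independent find scans + running minimum by a single left-to-right
-- scan from max(start_pos+10, 0) returning the first position where any keyword starts
-- (objective: alternative); on a negative wrapped start (see D_ below) B intentionally
-- scans from the start of the text where A skips its beginning.

-- ===== PORT A =====
def find_section_end_py (text : String) (start_pos : Int) : Int :=
  let next_sections : List String := ["education", "skills", "projects", "certifications", "awards"]
  let text_lower := PySem.Str.lower text
  let min_end : Int := (PySem.Str.len text : Int)
  next_sections.foldl (fun min_end sec =>
    let pos := PySem.Str.findFrom text_lower sec (start_pos + 10)
    if pos ≠ -1 ∧ pos < min_end then pos else min_end) min_end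

-- ===== PORT B =====
def pvKeywords : List (List Char) :=
  ["education".toList, "skills".toList, "projects".toList, "certifications".toList, "awards".toList]

-- `any(tl.startswith(k, i) for k in keywords)`; startswith with a nonnegative start
-- argument is exactly a prefix test on the drop (ported by hand, exact for 0 ≤ i)
def pvAnyMatch (tl : List Char) (i : Nat) : Bool :=
  pvKeywords.any (fun k => k.isPrefixOf (tl.drop i))

-- `for i in range(start, n): if any(...): return i` / `return n`, fuel = n - start
def pvScan (tl : List Char) (n : Nat) : Nat → Nat → Int
  | 0, _ => (n : Int)
  | fuel + 1, i => if pvAnyMatch tl i then (i : Int) else pvScan tl n fuel (i + 1)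

def find_section_end_py_alt (text : String) (start_pos : Int) : Int :=
  let tl := (PySem.Str.lower text).toList
  let n : Nat := (PySem.Str.len text).toNat
  let start : Nat := (max (start_pos + 10) 0).toNat
  pvScan tl n (n - start) start

-- ===== PRECONDITION & SPEC =====
-- When start_pos+10 is negative but start_pos+10+len(text) is not, A inherits str.find's
-- count-from-the-end reading of the negative start and skips the beginning of the text; on
-- texts with a keyword before that wrapped position A returns a later position (or
-- len(text)) while B returns the first keyword position from the start of the text, which
-- is the intended 'nearest next section' for an offset before the text.
def D_find_section_end_py (text : String) (start_pos : Int) : Prop :=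
  start_pos + 10 < 0 ∧ 0 ≤ start_pos + 10 + (PySem.Str.len text : Int) ∧
  ∃ j < (start_pos + 10 + (PySem.Str.len text : Int)).toNat,
    ∃ k ∈ (["education", "skills", "projects", "certifications", "awards"] : List String),
      k.toList <+: ((PySem.Str.lower text).toList.drop j)
instance (text : String) (start_pos : Int) : Decidable (D_find_section_end_py text start_pos) := by
  unfold D_find_section_end_py; infer_instance

def Spec_find_section_end_py (text : String) (start_pos : Int) (out : Int) : Prop :=
  ¬ D_find_section_end_py text start_pos → out = find_section_end_py_alt text start_pos
instance (text : String) (start_pos : Int) (out : Int) : Decidable (Spec_find_section_end_py text start_pos out) := by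
  unfold Spec_find_section_end_py; infer_instance

def pvDiffWitness_find_section_end_py : String × Int := ("skills", -11)
def pvDiffWitnessOut_find_section_end_py : Int × Int := (6, 0)

-- ===== CLAIM (what is proved, stated in full; the proofs are below) =====
def Claim_unchanged_find_section_end_py : Prop := ∀ (text : String) (start_pos : Int), Dom_find_section_end_py text start_pos → Spec_find_section_end_py text start_pos (find_section_end_py text start_pos)
def Claim_changed_find_section_end_py : Prop := Dom_find_section_end_py (pvDiffWitness_find_section_end_py.1) (pvDiffWitness_find_section_end_py.2) ∧ D_find_section_end_py (pvDiffWitness_find_section_end_py.1) (pvDiffWitness_find_section_end_py.2) ∧ find_section_end_py (pvDiffWitness_find_section_end_py.1) (pvDiffWitness_find_section_end_py.2) = pvDiffWitnessOut_find_section_end_py.1 ∧ find_section_end_py_alt (pvDiffWitness_find_section_end_py.1) (pvDiffWitness_find_section_end_py.2) = pvDiffWitnessOut_find_section_end_py.2 ∧ pvDiffWitnessOut_find_section_end_py.1 ≠ pvDiffWitnessOut_find_section_end_py.2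
def Claim_exact_find_section_end_py : Prop := ∀ (text : String) (start_pos : Int), Dom_find_section_end_py text start_pos → D_find_section_end_py text start_pos → find_section_end_py text start_pos ≠ find_section_end_py_alt text start_pos

-- ===== LEMMAS AND PROOFS =====

-- every keyword is a nonempty list
lemma pvKeywords_ne_nil : ∀ k ∈ pvKeywords, k ≠ [] := by decide

-- the start offset after Python's str.find slice-bound normalization, as a Nat
def pvStart (st : Int) (n : Nat) : Nat :=
  (if st < 0 then (if st + n < 0 then 0 else st + n) else st).toNat

-- A's fold over the keyword list, named for the proofs
def pvFoldA (tl : List Char) (s0 : Int) (ks : List (List Char)) (m : Int) : Int :=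
  ks.foldl (fun m k =>
    let pos := PySem.Chars.findFrom tl k s0
    if pos ≠ -1 ∧ pos < m then pos else m) m

-- findFrom only depends on the normalized start
lemma findFrom_normalize (L sub : List Char) (st : Int) :
    PySem.Chars.findFrom L sub st = PySem.Chars.findFrom L sub (pvStart st L.length) := by
  unfold PySem.Chars.findFrom pvStart
  dsimp only
  split_ifs <;> simp_all [Int.toNat_natCast] <;> omega

-- start past the length: nothing is found
lemma findFrom_past (L sub : List Char) (k : Nat) (h : L.length < k) :
    PySem.Chars.findFrom L sub (k : Int) = -1 := by
  have h2 : ((L.length : Int)) < (k : Int) := by exact_mod_cast h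
  unfold PySem.Chars.findFrom
  dsimp only
  split_ifs <;> first | rfl | omega

lemma pvFoldA_normalize (tl : List Char) (st : Int) :
    ∀ (ks : List (List Char)) (m : Int),
      pvFoldA tl st ks m = pvFoldA tl (pvStart st tl.length) ks m := by
  intro ks
  induction ks with
  | nil => intro m; rfl
  | cons k ks ih =>
    intro m
    simp only [pvFoldA, List.foldl_cons] at *
    rw [findFrom_normalize]
    exact ih _

-- a prefix occurrence at j ≥ s0 is an infix of the drop at s0
lemma pv_prefix_infix {L sub : List Char} {s0 j : Nat} (hj : s0 ≤ j)
    (hpre : sub <+: L.drop j) : sub <:+: L.drop s0 := by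
  have hd : L.drop j = (L.drop s0).drop (j - s0) := by
    rw [List.drop_drop]; congr 1; omega
  rw [hd] at hpre
  exact hpre.isInfix.trans (List.drop_suffix _ _).isInfix

lemma pv_none_after {L sub : List Char} {s0 : Nat} (hs0 : s0 ≤ L.length)
    (h : PySem.Chars.findFrom L sub (s0 : Int) = -1) :
    ∀ j : Nat, s0 ≤ j → ¬ sub <+: L.drop j := by
  intro j hj hpre
  exact ((PySem.Chars.findFrom_natCast_eq_neg_one_iff L sub s0 hs0).mp h)
    (pv_prefix_infix hj hpre)

lemma pv_lt_of_prefix {L sub : List Char} {p : Nat} (hne : sub ≠ [])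
    (hpre : sub <+: L.drop p) : p < L.length := by
  have h1 := hpre.length_le
  have h2 : 0 < sub.length := List.length_pos_of_ne_nil hne
  simp only [List.length_drop] at h1
  omega

-- characterization of B's scan loop
lemma pvScan_spec (tl : List Char) : ∀ fuel i, i + fuel = tl.length →
    (pvScan tl tl.length fuel i = (tl.length : Int) ∧
       ∀ j, i ≤ j → j < tl.length → pvAnyMatch tl j = false)
    ∨ (∃ m : Nat, pvScan tl tl.length fuel i = (m : Int) ∧ i ≤ m ∧ m < tl.length ∧
       pvAnyMatch tl m = true ∧ ∀ j, i ≤ j → j < m → pvAnyMatch tl j = false) := by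
  intro fuel
  induction fuel with
  | zero => intro i hi; left; exact ⟨rfl, fun j hj hjn => by omega⟩
  | succ fuel ih =>
    intro i hi
    by_cases hm : pvAnyMatch tl i = true
    · right
      exact ⟨i, by simp [pvScan, hm], le_refl i, by omega, hm, fun j hj hjlt => by omega⟩
    · rw [Bool.not_eq_true] at hm
      have hstep : pvScan tl tl.length (fuel+1) i = pvScan tl tl.length fuel (i+1) := by
        simp [pvScan, hm]
      rcases ih (i+1) (by omega) with ⟨heq, hall⟩ | ⟨m, heq, him, hmn, hmatch, hmin⟩
      · left
        refine ⟨hstep ▸ heq, fun j hj hjn => ?_⟩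
        rcases Nat.eq_or_lt_of_le hj with h | h
        · exact h ▸ hm
        · exact hall j (by omega) hjn
      · right
        refine ⟨m, hstep ▸ heq, by omega, hmn, hmatch, fun j hj hjlt => ?_⟩
        rcases Nat.eq_or_lt_of_le hj with h | h
        · exact h ▸ hm
        · exact hmin j (by omega) hjlt

-- invariant of A's fold
def pvInv (tl : List Char) (s0 : Nat) (m : Int) : Prop :=
  m = (tl.length : Int) ∨
    ((s0 : Int) ≤ m ∧ m < (tl.length : Int) ∧ 0 ≤ m ∧ pvAnyMatch tl m.toNat = true)

lemma pvFold_inv (tl : List Char) (s0 : Nat) (hs0 : s0 ≤ tl.length) :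
    ∀ ks : List (List Char), (∀ k ∈ ks, k ∈ pvKeywords) → ∀ m : Int, pvInv tl s0 m →
    pvInv tl s0 (pvFoldA tl (s0 : Int) ks m) ∧ pvFoldA tl (s0 : Int) ks m ≤ m ∧
    ∀ j : Nat, s0 ≤ j → (∃ k ∈ ks, k.isPrefixOf (tl.drop j)) →
      pvFoldA tl (s0 : Int) ks m ≤ (j : Int) := by
  intro ks
  induction ks with
  | nil =>
    intro _ m hm
    refine ⟨hm, le_refl m, fun j _ hj => ?_⟩
    rcases hj with ⟨k, hk, _⟩
    simp at hk
  | cons k ks ih =>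
    intro hks m hm
    have hkmem : k ∈ pvKeywords := hks k (by simp)
    have hkne : k ≠ [] := pvKeywords_ne_nil k hkmem
    simp only [pvFoldA, List.foldl_cons]
    set pos := PySem.Chars.findFrom tl k (s0 : Int) with hposdef
    set m' : Int := if pos ≠ -1 ∧ pos < m then pos else m with hm'def
    have hm'le : m' ≤ m := by
      rw [hm'def]; split_ifs with h
      · exact le_of_lt h.2
      · exact le_refl m
    have hinv' : pvInv tl s0 m' := by
      rw [hm'def]; split_ifs with h
      · obtain ⟨hge, hpre, _⟩ := PySem.Chars.findFrom_natCast_spec tl k s0 hs0 h.1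
        right
        have hlt : pos.toNat < tl.length := pv_lt_of_prefix hkne hpre
        refine ⟨hge, by omega, by omega, ?_⟩
        unfold pvAnyMatch
        rw [List.any_eq_true]
        exact ⟨k, hkmem, List.isPrefixOf_iff_prefix.mpr hpre⟩
      · exact hm
    have hkmin : ∀ j : Nat, s0 ≤ j → k.isPrefixOf (tl.drop j) = true → m' ≤ (j : Int) := by
      intro j hj hpj
      have hpj' : k <+: tl.drop j := List.isPrefixOf_iff_prefix.mp hpj
      by_cases hne : pos = -1
      · exact absurd hpj' (pv_none_after hs0 (hposdef ▸ hne) j hj)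
      · obtain ⟨hge, hpre, hmin⟩ := PySem.Chars.findFrom_natCast_spec tl k s0 hs0 hne
        have hjge : pos ≤ (j : Int) := by
          by_contra hcon
          push_neg at hcon
          exact hmin j hj (by omega) hpj'
        rw [hm'def]; split_ifs with h
        · exact hjge
        · push_neg at h
          rcases eq_or_ne pos (-1) with h1 | h1
          · exact absurd h1 hne
          · exact le_trans (h h1) hjge
    obtain ⟨ih1, ih2, ih3⟩ := ih (fun k' hk' => hks k' (by simp [hk'])) m' hinv'
    refine ⟨ih1, le_trans ih2 hm'le, fun j hj hjm => ?_⟩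
    rcases hjm with ⟨k', hk', hpk'⟩
    rcases List.mem_cons.mp hk' with h | h
    · exact le_trans ih2 (hkmin j hj (h ▸ hpk'))
    · exact ih3 j hj ⟨k', h, hpk'⟩

-- the (5-keyword) fold equals the single scan from the normalized start
lemma pv_core (tl : List Char) (st : Int) :
    pvFoldA tl st pvKeywords (tl.length : Int) =
      pvScan tl tl.length (tl.length - pvStart st tl.length) (pvStart st tl.length) := by
  rw [pvFoldA_normalize]
  set s0 := pvStart st tl.length with hs0def
  by_cases hs0 : s0 ≤ tl.length
  · obtain ⟨hinv, _, hminim⟩ :=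
      pvFold_inv tl s0 hs0 pvKeywords (fun k hk => hk) (tl.length : Int) (Or.inl rfl)
    set a := pvFoldA tl (s0 : Int) pvKeywords (tl.length : Int) with hadef
    rcases pvScan_spec tl (tl.length - s0) s0 (by omega) with
      ⟨heq, hall⟩ | ⟨m, heq, him, hmn, hmatch, hmin⟩
    · rw [heq]
      rcases hinv with h | ⟨h1, h2, h3, h4⟩
      · exact h
      · exact absurd h4 (by simp [hall a.toNat (by omega) (by omega)])
    · rw [heq]
      have ham : a ≤ (m : Int) := by
        apply hminim m him
        unfold pvAnyMatch at hmatch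
        rw [List.any_eq_true] at hmatch
        exact hmatch
      rcases hinv with h | ⟨h1, h2, h3, h4⟩
      · omega
      · have : ¬ a.toNat < m := fun hcon =>
          by simpa [h4] using hmin a.toNat (by omega) hcon
        omega
  · have hall : ∀ sub : List Char, PySem.Chars.findFrom tl sub (s0 : Int) = -1 :=
      fun sub => findFrom_past tl sub s0 (by omega)
    have hz : tl.length - s0 = 0 := by omega
    rw [hz]
    simp [pvFoldA, pvKeywords, hall, pvScan]

-- the match condition written in D_ is pvAnyMatch
lemma pvAnyMatch_iff (tl : List Char) (j : Nat) :
    pvAnyMatch tl j = true ↔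
      ∃ k ∈ (["education", "skills", "projects", "certifications", "awards"] : List String),
        k.toList <+: tl.drop j := by
  simp [pvAnyMatch, pvKeywords, List.isPrefixOf_iff_prefix]

-- scanning from 0 equals scanning from s0 when no position below s0 matches
lemma pvScan_skip (tl : List Char) (s0 : Nat) (hs0 : s0 ≤ tl.length)
    (h : ∀ j < s0, pvAnyMatch tl j = false) :
    pvScan tl tl.length tl.length 0 = pvScan tl tl.length (tl.length - s0) s0 := by
  rcases pvScan_spec tl tl.length 0 (by omega) with ⟨heq0, hall0⟩ | ⟨m, heq0, _, hmn, hmatch, hmin⟩ <;>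
    rcases pvScan_spec tl (tl.length - s0) s0 (by omega) with ⟨heqs, halls⟩ | ⟨m', heqs, him', hmn', hmatch', hmin'⟩
  · rw [heq0, heqs]
  · exact absurd hmatch' (by simp [hall0 m' (by omega) hmn'])
  · have hms : s0 ≤ m := by
      by_contra hc; push_neg at hc
      simp [h m hc] at hmatch
    exact absurd hmatch (by simp [halls m hms hmn])
  · rw [heq0, heqs]
    have hms : s0 ≤ m := by
      by_contra hc; push_neg at hc
      simp [h m hc] at hmatch
    have h1 : ¬ m' < m := by
      intro hc; have := hmin m' (by omega) hc; simp [this] at hmatch'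
    have h2 : ¬ m < m' := by
      intro hc; have := hmin' m hms hc; simp [this] at hmatch
    omega

-- both ports, written with pvScan over the lowered character list
lemma portA_eq (text : String) (start_pos : Int) :
    find_section_end_py text start_pos =
      pvScan (PySem.Chars.lower text.toList) text.toList.length
        (text.toList.length - pvStart (start_pos + 10) text.toList.length)
        (pvStart (start_pos + 10) text.toList.length) := by
  have hlen : (PySem.Chars.lower text.toList).length = text.toList.length := by
    simp [PySem.Chars.lower]
  unfold find_section_end_py
  simp only [PySem.Str.findFrom_eq, PySem.Str.toList_lower, PySem.Str.len]
  have := pv_core (PySem.Chars.lower text.toList) (start_pos + 10)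
  rw [hlen] at this
  convert this using 2

lemma portB_eq (text : String) (start_pos : Int) :
    find_section_end_py_alt text start_pos =
      pvScan (PySem.Chars.lower text.toList) text.toList.length
        (text.toList.length - (max (start_pos + 10) 0).toNat)
        ((max (start_pos + 10) 0).toNat) := by
  have hlen : (PySem.Chars.lower text.toList).length = text.toList.length := by
    simp [PySem.Chars.lower]
  unfold find_section_end_py_alt
  simp [PySem.Str.toList_lower, PySem.Str.len]

-- ===== VERDICT (by name: the statements are the Claim_ definitions above) =====
theorem find_section_end_py_spec : Claim_unchanged_find_section_end_py := by
  intro text start_pos _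
  unfold Spec_find_section_end_py
  intro hnD
  rw [portA_eq, portB_eq]
  set tl := PySem.Chars.lower text.toList with htl
  have hlen : tl.length = text.toList.length := by simp [htl, PySem.Chars.lower]
  set st := start_pos + 10 with hst
  rcases lt_or_ge st 0 with hneg | hpos
  · rcases lt_or_ge (st + text.toList.length) 0 with hoff | hin
    · -- both start at 0
      have h1 : pvStart st text.toList.length = 0 := by
        unfold pvStart; rw [if_pos hneg, if_pos hoff]; rfl
      have h2 : (max st 0).toNat = 0 := by omega
      rw [h1, h2]
    · -- A starts at (st+n).toNat, B at 0; ¬D_ says nothing matches below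
      have h1 : pvStart st text.toList.length = (st + text.toList.length).toNat := by
        unfold pvStart; rw [if_pos hneg, if_neg (by omega)]
      have h2 : (max st 0).toNat = 0 := by omega
      rw [h1, h2, ← hlen]
      rw [show tl.length - 0 = tl.length from rfl]
      refine (pvScan_skip tl ((st + (tl.length : Int)).toNat) (by omega) ?_).symm
      intro j hj
      by_contra hc
      rw [Bool.not_eq_false, pvAnyMatch_iff] at hc
      apply hnD
      have hlenI : (PySem.Str.len text : Int) = (text.toList.length : Int) := by
        simp [PySem.Str.len]
      refine ⟨hneg, by rw [hlenI]; omega, j, ?_, ?_⟩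
      · rw [hlenI]; omega
      · simpa [htl, PySem.Str.toList_lower] using hc
  · have h1 : pvStart st text.toList.length = st.toNat := by
      unfold pvStart; rw [if_neg (by omega)]
    have h2 : (max st 0).toNat = st.toNat := by omega
    rw [h1, h2]

theorem find_section_end_py_changed : Claim_changed_find_section_end_py := by
  unfold Claim_changed_find_section_end_py; decide

theorem find_section_end_py_tight : Claim_exact_find_section_end_py := by
  intro text start_pos _ hD
  obtain ⟨hneg, hin, j, hj, hmatchD⟩ := hD
  have hlenI : (PySem.Str.len text : Int) = (text.toList.length : Int) := by
    simp [PySem.Str.len]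
  rw [hlenI] at hin hj
  set tl := PySem.Chars.lower text.toList with htl
  have hlen : tl.length = text.toList.length := by simp [htl, PySem.Chars.lower]
  set st := start_pos + 10 with hst
  set sA : Nat := (st + text.toList.length).toNat with hsA
  have hmatch : pvAnyMatch tl j = true := by
    rw [pvAnyMatch_iff]
    simpa [htl, PySem.Str.toList_lower] using hmatchD
  have hjA : j < sA := by omega
  have hsAle : sA ≤ tl.length := by omega
  rw [portA_eq, portB_eq]
  have h1 : pvStart st text.toList.length = sA := by
    unfold pvStart; rw [if_pos hneg, if_neg (by omega)]
  have h2 : (max st 0).toNat = 0 := by omega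
  rw [h1, h2, ← hlen]
  rw [show tl.length - 0 = tl.length from rfl]
  -- B finds a match at some m ≤ j < sA; A's scan result is n or ≥ sA
  rcases pvScan_spec tl tl.length 0 (by omega) with ⟨_, hall0⟩ | ⟨m, heq0, _, hmn, _, hmin⟩
  · exact absurd hmatch (by simp [hall0 j (by omega) (by omega)])
  · have hmj : m ≤ j := by
      by_contra hc; push_neg at hc
      simp [hmin j (by omega) hc] at hmatch
    rw [heq0]
    rcases pvScan_spec tl (tl.length - sA) sA (by omega) with ⟨heqs, _⟩ | ⟨m', heqs, him', _, _, _⟩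
    · rw [heqs]; intro hc; omega
    · rw [heqs]; intro hc; omega
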